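-- pv_equiv track=rewrite | github.com/BerriAI/litellm | litellm/proxy/guardrails/guardrail_hooks/generic_guardrail_api/generic_guardrail_api.py | _header_value_allowed
-- ===== SOURCE A (Python) =====
-- import fnmatch
--
-- _HEADER_VALUE_ALLOWLIST = frozenset({
--     "host",
--     "accept-encoding",
--     "connection",
--     "accept",
--     "content-type",
--     "user-agent",
--     "x-stainless-*",
--     "x-litellm-*",
--     "content-length",
-- })
--
-- def _header_value_allowed(header_name: str) -> bool:
--     """Return True if this header's value may be forwarded (allowlist, including globs)."""
--     lower = header_name.lower()
--     if lower in _HEADER_VALUE_ALLOWLIST: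
--         return True
--     for pattern in _HEADER_VALUE_ALLOWLIST:
--         if "*" in pattern and fnmatch.fnmatch(lower, pattern):
--             return True
--     return False
-- ===== SOURCE B (Python) =====
-- _EXACT = frozenset({
--     "host",
--     "accept-encoding",
--     "connection",
--     "accept",
--     "content-type",
--     "user-agent",
--     "content-length",
-- })
-- _GLOB_PREFIXES = ("x-stainless-", "x-litellm-")
--
-- def _header_value_allowed(header_name: str) -> bool:
--     """Return True if this header's value may be forwarded (allowlist, including globs)."""
--     lower = header_name.lower()
--     return lower in _EXACT or lower.startswith(_GLOB_PREFIXES)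
-- ===== Notes on version B (the rewrite author's own statement) =====
-- stated objective: simpler
-- what changed: The allowlist is pre-split at load time into exact names and the two glob stems as plain prefixes, so the function is one membership test plus one startswith over a prefix tuple, with no fnmatch pattern-scanning loop at call time.
import Mathlib
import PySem

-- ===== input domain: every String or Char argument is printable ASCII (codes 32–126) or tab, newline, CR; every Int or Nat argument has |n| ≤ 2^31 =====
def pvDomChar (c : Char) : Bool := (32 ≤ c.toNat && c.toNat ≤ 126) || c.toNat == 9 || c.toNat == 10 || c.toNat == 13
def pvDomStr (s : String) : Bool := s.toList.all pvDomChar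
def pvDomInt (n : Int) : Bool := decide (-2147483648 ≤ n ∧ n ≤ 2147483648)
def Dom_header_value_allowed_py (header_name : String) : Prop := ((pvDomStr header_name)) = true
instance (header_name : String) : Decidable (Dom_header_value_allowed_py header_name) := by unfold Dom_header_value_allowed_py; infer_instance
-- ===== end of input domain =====

-- B pre-splits the allowlist into exact names and plain glob-stem prefixes, replacing the
-- fnmatch pattern-scanning loop with one membership test plus startswith (objective: simpler).

-- ===== PORT A =====
-- the frozenset allowlist (iteration order of a frozenset is arbitrary; the result only
-- depends on membership, so the source-literal order is used)
def pvAllowlist : List String :=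
  ["host", "accept-encoding", "connection", "accept", "content-type",
   "user-agent", "x-stainless-*", "x-litellm-*", "content-length"]

-- glob matcher for fnmatch.fnmatch: exact for patterns built from literal characters and '*'
-- (the only kind occurring in the allowlist; no '?' or '[...]'); both arguments are already
-- lowercase here, so POSIX normcase is the identity.
def pvGlob : List Char → List Char → Bool
  | [], s => s.isEmpty
  | c :: ps, s =>
    if c = '*' then
      pvGlob ps s || (match s with | [] => false | _ :: t => pvGlob (c :: ps) t)
    else
      match s with | [] => false | d :: t => (c == d) && pvGlob ps t
termination_by p s => (p.length, s.length)

def pvFnmatch (name pat : String) : Bool := pvGlob pat.toList name.toList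

def header_value_allowed_py (header_name : String) : Bool :=
  let lower := PySem.Str.lower header_name
  if pvAllowlist.contains lower then true
  else
    pvAllowlist.foldl
      (fun acc pattern => acc || (PySem.Str.isIn "*" pattern && pvFnmatch lower pattern))
      false

-- ===== PORT B =====
def pvExact : List String :=
  ["host", "accept-encoding", "connection", "accept", "content-type",
   "user-agent", "content-length"]

def header_value_allowed_py_alt (header_name : String) : Bool :=
  let lower := PySem.Str.lower header_name
  pvExact.contains lower
    || PySem.Str.startswith lower "x-stainless-"
    || PySem.Str.startswith lower "x-litellm-"

-- ===== PRECONDITION & SPEC =====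
def Spec_header_value_allowed_py (header_name : String) (out : Bool) : Prop := out = header_value_allowed_py_alt header_name
instance (header_name : String) (out : Bool) : Decidable (Spec_header_value_allowed_py header_name out) := by unfold Spec_header_value_allowed_py; infer_instance

-- ===== CLAIM (what is proved, stated in full; the proofs are below) =====
def Claim_equal_header_value_allowed_py : Prop := ∀ (header_name : String), Dom_header_value_allowed_py header_name → Spec_header_value_allowed_py header_name (header_value_allowed_py header_name)

-- ===== LEMMAS AND PROOFS =====

theorem pvGlob_star (s : List Char) : pvGlob ['*'] s = true := by
  induction s with
  | nil => simp [pvGlob]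
  | cons c t ih => simp [pvGlob, ih]

theorem pvGlob_lit_star (p : List Char) (hp : '*' ∉ p) (s : List Char) :
    pvGlob (p ++ ['*']) s = p.isPrefixOf s := by
  induction p generalizing s with
  | nil => simp [pvGlob_star, List.isPrefixOf]
  | cons c p' ih =>
    simp only [List.mem_cons, not_or] at hp
    have hc : ¬ c = '*' := fun h => hp.1 h.symm
    cases s with
    | nil => simp [pvGlob, hc, List.isPrefixOf]
    | cons d t => simp [pvGlob, hc, List.isPrefixOf, ih hp.2]

theorem pv_core (L : String) :
    (if pvAllowlist.contains L then true
     else pvAllowlist.foldl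
       (fun acc pattern => acc || (PySem.Str.isIn "*" pattern && pvFnmatch L pattern)) false)
    = (pvExact.contains L
        || PySem.Str.startswith L "x-stainless-"
        || PySem.Str.startswith L "x-litellm-") := by
  have h1 : pvFnmatch L "x-stainless-*" = PySem.Str.startswith L "x-stainless-" := by
    have := pvGlob_lit_star ("x-stainless-".toList) (by decide) L.toList
    simpa [pvFnmatch, PySem.Str.startswith, PySem.Chars.startswith,
      show ("x-stainless-*".toList = "x-stainless-".toList ++ ['*']) from rfl] using this
  have h2 : pvFnmatch L "x-litellm-*" = PySem.Str.startswith L "x-litellm-" := by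
    have := pvGlob_lit_star ("x-litellm-".toList) (by decide) L.toList
    simpa [pvFnmatch, PySem.Str.startswith, PySem.Chars.startswith,
      show ("x-litellm-*".toList = "x-litellm-".toList ++ ['*']) from rfl] using this
  by_cases e1 : L = "x-stainless-*"
  · subst e1; decide
  by_cases e2 : L = "x-litellm-*"
  · subst e2; decide
  simp only [pvAllowlist, pvExact, List.contains_cons, List.contains_nil, List.foldl,
    h1, h2]
  have b1 : (L == "x-stainless-*") = false := by simp [e1]
  have b2 : (L == "x-litellm-*") = false := by simp [e2]
  simp only [b1, b2,
    (by decide : PySem.Str.isIn "*" "host" = false),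
    (by decide : PySem.Str.isIn "*" "accept-encoding" = false),
    (by decide : PySem.Str.isIn "*" "connection" = false),
    (by decide : PySem.Str.isIn "*" "accept" = false),
    (by decide : PySem.Str.isIn "*" "content-type" = false),
    (by decide : PySem.Str.isIn "*" "user-agent" = false),
    (by decide : PySem.Str.isIn "*" "content-length" = false),
    (by decide : PySem.Str.isIn "*" "x-stainless-*" = true),
    (by decide : PySem.Str.isIn "*" "x-litellm-*" = true),
    Bool.false_and, Bool.true_and, Bool.or_false, Bool.false_or]
  cases hs1 : PySem.Str.startswith L "x-stainless-" <;>
    cases hs2 : PySem.Str.startswith L "x-litellm-" <;>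
      simp [hs1, hs2, beq_eq_decide]

-- ===== VERDICT (by name: the statement is the Claim_ definition above) =====
theorem header_value_allowed_py_spec : Claim_equal_header_value_allowed_py := by
  intro header_name _
  unfold Spec_header_value_allowed_py header_value_allowed_py header_value_allowed_py_alt
  exact pv_core (PySem.Str.lower header_name)
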